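-- pv_equiv track=rewrite | github.com/kenkun091/seismic-chatbot | core/chatbot.py | _get_example_commands
-- ===== SOURCE A (Python) =====
-- from typing import Dict, Any, Optional, List
--
-- def _get_example_commands(tool_name: str, missing_params: List[str]) -> str:
--     """
--     Generate example commands for missing parameters.
--
--     Args:
--         tool_name: Name of the tool
--         missing_params: List of missing parameters
--
--     Returns:
--         str: Example commands
--     """
--     if tool_name == 'wedge_model':
--         examples = []
--         if 'max_thickness' in missing_params:
--             examples.append('- "with 100m thickness"')
--         if any(p in missing_params for p in ['v1', 'v2', 'v3']):
--             examples.append('- "velocities [2000, 2500, 3000]"')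
--         if any(p in missing_params for p in ['rho1', 'rho2', 'rho3']):
--             examples.append('- "densities [2.1, 2.2, 2.3]"')
--         if 'wavelet_freq' in missing_params:
--             examples.append('- "30 Hz wavelet"')
--         return "\n".join(examples)
--
--     elif tool_name == 'make_ricker':
--         examples = []
--         if 'frequency' in missing_params:
--             examples.append('- "30 Hz Ricker wavelet"')
--         if 'dt' in missing_params:
--             examples.append('- "with 0.001s sampling"')
--         return "\n".join(examples)
--
--     return "- Provide the missing parameters in any format you prefer"
-- ===== SOURCE B (Python) =====
-- from typing import List
--
-- # Inverted index: for each tool, map every parameter name to the id of the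
-- # hint it triggers; hints are listed once, in output order.
-- _PARAM_HINT = {
--     'wedge_model': {
--         'max_thickness': 0,
--         'v1': 1, 'v2': 1, 'v3': 1,
--         'rho1': 2, 'rho2': 2, 'rho3': 2,
--         'wavelet_freq': 3,
--     },
--     'make_ricker': {'frequency': 0, 'dt': 1},
-- }
-- _HINTS = {
--     'wedge_model': ['- "with 100m thickness"',
--                     '- "velocities [2000, 2500, 3000]"',
--                     '- "densities [2.1, 2.2, 2.3]"',
--                     '- "30 Hz wavelet"'],
--     'make_ricker': ['- "30 Hz Ricker wavelet"',
--                     '- "with 0.001s sampling"'],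
-- }
--
-- def _get_example_commands(tool_name: str, missing_params: List[str]) -> str:
--     index = _PARAM_HINT.get(tool_name)
--     if index is None:
--         return "- Provide the missing parameters in any format you prefer"
--     triggered = set()
--     for p in missing_params:
--         if p in index:
--             triggered.add(index[p])
--     return "\n".join(h for i, h in enumerate(_HINTS[tool_name]) if i in triggered)
-- ===== Notes on version B (the rewrite author's own statement) =====
-- stated objective: alternative
-- what changed: Inverts the traversal: instead of scanning missing_params once per rule, B makes a single pass over missing_params, mapping each name through an inverted param->hint-id index into a set of triggered hint ids, then emits the tool's hints whose id is in the set.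
import Mathlib
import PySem

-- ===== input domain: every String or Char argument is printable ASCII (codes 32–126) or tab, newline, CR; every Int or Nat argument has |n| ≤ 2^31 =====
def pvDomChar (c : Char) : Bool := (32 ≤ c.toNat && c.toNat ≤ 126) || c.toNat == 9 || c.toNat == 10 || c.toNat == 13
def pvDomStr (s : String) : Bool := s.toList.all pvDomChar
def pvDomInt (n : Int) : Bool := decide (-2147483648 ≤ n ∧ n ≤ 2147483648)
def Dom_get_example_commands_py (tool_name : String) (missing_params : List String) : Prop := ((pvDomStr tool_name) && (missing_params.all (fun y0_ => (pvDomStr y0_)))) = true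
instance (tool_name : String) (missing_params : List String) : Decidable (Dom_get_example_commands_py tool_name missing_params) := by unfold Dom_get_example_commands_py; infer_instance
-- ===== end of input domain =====

-- B inverts the traversal: a single pass over missing_params through an inverted param->hint-id
-- index collects a set of triggered hint ids, then the tool's hints with those ids are emitted (objective: alternative).

-- ===== PORT A =====
def get_example_commands_py (tool_name : String) (missing_params : List String) : String :=
  if tool_name == "wedge_model" then
    let examples : List String := []
    let examples := if missing_params.contains "max_thickness" then examples ++ ["- \"with 100m thickness\""] else examples
    let examples := if ["v1", "v2", "v3"].any (fun p => missing_params.contains p) then examples ++ ["- \"velocities [2000, 2500, 3000]\""] else examples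
    let examples := if ["rho1", "rho2", "rho3"].any (fun p => missing_params.contains p) then examples ++ ["- \"densities [2.1, 2.2, 2.3]\""] else examples
    let examples := if missing_params.contains "wavelet_freq" then examples ++ ["- \"30 Hz wavelet\""] else examples
    PySem.Str.join "\n" examples
  else if tool_name == "make_ricker" then
    let examples : List String := []
    let examples := if missing_params.contains "frequency" then examples ++ ["- \"30 Hz Ricker wavelet\""] else examples
    let examples := if missing_params.contains "dt" then examples ++ ["- \"with 0.001s sampling\""] else examples
    PySem.Str.join "\n" examples
  else
    "- Provide the missing parameters in any format you prefer"

-- ===== PORT B =====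
def pvParamHint : PySem.Dict String (PySem.Dict String Int) := PySem.Dict.ofList
  [("wedge_model", PySem.Dict.ofList
      [("max_thickness", 0),
       ("v1", 1), ("v2", 1), ("v3", 1),
       ("rho1", 2), ("rho2", 2), ("rho3", 2),
       ("wavelet_freq", 3)]),
   ("make_ricker", PySem.Dict.ofList [("frequency", 0), ("dt", 1)])]

def pvHints : PySem.Dict String (List String) := PySem.Dict.ofList
  [("wedge_model",
     ["- \"with 100m thickness\"",
      "- \"velocities [2000, 2500, 3000]\"",
      "- \"densities [2.1, 2.2, 2.3]\"",
      "- \"30 Hz wavelet\""]),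
   ("make_ricker",
     ["- \"30 Hz Ricker wavelet\"",
      "- \"with 0.001s sampling\""])]

def get_example_commands_py_alt (tool_name : String) (missing_params : List String) : String :=
  match pvParamHint.get? tool_name with
  | none => "- Provide the missing parameters in any format you prefer"
  | some index =>
      let triggered : PySem.Set Int :=
        missing_params.foldl (fun s p =>
          match index.get? p with
          | some i => PySem.Set.add s i
          | none => s) PySem.Set.empty
      PySem.Str.join "\n"
        (((PySem.List.enumerate ((pvHints.get? tool_name).getD [])).filter
            (fun e => triggered.contains e.1)).map (fun e => e.2))

-- ===== PRECONDITION & SPEC =====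
def Spec_get_example_commands_py (tool_name : String) (missing_params : List String) (out : String) : Prop := out = get_example_commands_py_alt tool_name missing_params
instance (tool_name : String) (missing_params : List String) (out : String) : Decidable (Spec_get_example_commands_py tool_name missing_params out) := by unfold Spec_get_example_commands_py; infer_instance

-- ===== CLAIM (what is proved, stated in full; the proofs are below) =====
def Claim_equal_get_example_commands_py : Prop := ∀ (tool_name : String) (missing_params : List String), Dom_get_example_commands_py tool_name missing_params → Spec_get_example_commands_py tool_name missing_params (get_example_commands_py tool_name missing_params)

-- ===== LEMMAS AND PROOFS =====

theorem pv_contains_add (s : PySem.Set Int) (x i : Int) :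
    (PySem.Set.add s x).contains i = (s.contains i || x == i) := by
  simp only [PySem.Set.contains, List.contains_eq_mem]
  rw [Bool.eq_iff_iff]
  rw [decide_eq_true_iff, PySem.Set.mem_add]
  simp only [Bool.or_eq_true, decide_eq_true_iff, beq_iff_eq]
  constructor
  · rintro (h | h) <;> [exact Or.inl h; exact Or.inr h.symm]
  · rintro (h | h) <;> [exact Or.inl h; exact Or.inr h.symm]

theorem pv_contains_fold (index : PySem.Dict String Int) (xs : List String)
    (s : PySem.Set Int) (i : Int) :
    (xs.foldl (fun s p =>
        match index.get? p with
        | some j => PySem.Set.add s j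
        | none => s) s).contains i
      = (s.contains i || xs.any (fun p => index.get? p == some i)) := by
  induction xs generalizing s with
  | nil => simp
  | cons p xs ih =>
      simp only [List.foldl_cons, List.any_cons]
      cases h : index.get? p with
      | none =>
          simp only [h]
          rw [ih]
          simp
      | some j =>
          simp only [h]
          rw [ih, pv_contains_add]
          by_cases hj : j = i
          · subst hj; simp
          · simp [show (j == i) = false from by simp [hj],
              show (some j == some i) = false from by simp [hj]]

-- the inner index dict of the wedge_model rule (value of pvParamHint at "wedge_model")
def pvWIdx : PySem.Dict String Int := PySem.Dict.ofList
      [("max_thickness", 0), ("v1", 1), ("v2", 1), ("v3", 1),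
       ("rho1", 2), ("rho2", 2), ("rho3", 2), ("wavelet_freq", 3)]

def pvRIdx : PySem.Dict String Int := PySem.Dict.ofList [("frequency", 0), ("dt", 1)]

theorem pvWIdx_get (p : String) : pvWIdx.get? p =
    if p = "max_thickness" then some 0
    else if p = "v1" then some 1 else if p = "v2" then some 1 else if p = "v3" then some 1
    else if p = "rho1" then some 2 else if p = "rho2" then some 2 else if p = "rho3" then some 2
    else if p = "wavelet_freq" then some 3 else none := by
  have hit : pvWIdx.items =
      [("max_thickness", (0:Int)), ("v1", 1), ("v2", 1), ("v3", 1),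
       ("rho1", 2), ("rho2", 2), ("rho3", 2), ("wavelet_freq", 3)] := by decide
  simp only [PySem.Dict.get?, hit, List.find?]
  by_cases h1 : p = "max_thickness" <;>
  by_cases h2 : p = "v1" <;>
  by_cases h3 : p = "v2" <;>
  by_cases h4 : p = "v3" <;>
  by_cases h5 : p = "rho1" <;>
  by_cases h6 : p = "rho2" <;>
  by_cases h7 : p = "rho3" <;>
  by_cases h8 : p = "wavelet_freq" <;>
  simp_all [beq_eq_decide, eq_comm]

theorem pvRIdx_get (p : String) : pvRIdx.get? p =
    if p = "frequency" then some 0 else if p = "dt" then some 1 else none := by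
  have hit : pvRIdx.items = [("frequency", (0:Int)), ("dt", 1)] := by decide
  simp only [PySem.Dict.get?, hit, List.find?]
  by_cases h1 : p = "frequency" <;>
  by_cases h2 : p = "dt" <;>
  simp_all [beq_eq_decide, eq_comm]

theorem pv_any_one (mp : List String) (a : String) :
    (mp.any (fun p => p == a)) = mp.contains a := by
  rw [Bool.eq_iff_iff]
  simp [List.any_eq_true, List.contains_eq_mem]

theorem pv_any_tri (mp : List String) (a b c : String) :
    (mp.any (fun p => p == a || (p == b || p == c)))
      = (mp.contains a || (mp.contains b || mp.contains c)) := by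
  rw [Bool.eq_iff_iff]
  simp [List.any_eq_true, List.contains_eq_mem]
  aesop

-- ===== VERDICT (by name: the statement is the Claim_ definition above) =====
set_option maxHeartbeats 4000000 in
theorem get_example_commands_py_spec : Claim_equal_get_example_commands_py := by
  intro tool_name missing_params _
  unfold Spec_get_example_commands_py get_example_commands_py get_example_commands_py_alt
  by_cases h1 : tool_name = "wedge_model"
  · subst h1
    rw [show pvParamHint.get? "wedge_model" = some pvWIdx from by decide]
    simp only [show (("wedge_model" : String) == "wedge_model") = true from rfl, if_true]
    simp only [show pvHints.get? "wedge_model" = some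
        ["- \"with 100m thickness\"",
         "- \"velocities [2000, 2500, 3000]\"",
         "- \"densities [2.1, 2.2, 2.3]\"",
         "- \"30 Hz wavelet\""] from by decide,
      Option.getD_some, PySem.List.enumerate, List.filter, List.any_cons, List.any_nil,
      pv_contains_fold]
    have hfun : ∀ (k : Int), (fun p => pvWIdx.get? p == some k) =
        (fun p => decide (k = 0) && (p == "max_thickness")
          || decide (k = 1) && (p == "v1" || (p == "v2" || p == "v3"))
          || decide (k = 2) && (p == "rho1" || (p == "rho2" || p == "rho3"))
          || decide (k = 3) && (p == "wavelet_freq")) := by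
      intro k
      funext p
      rw [pvWIdx_get]
      split_ifs with a b c d e f g h <;> subst_eqs <;>
        by_cases hk0 : k = 0 <;> by_cases hk1 : k = 1 <;>
        by_cases hk2 : k = 2 <;> by_cases hk3 : k = 3 <;>
        simp_all [beq_eq_decide, eq_comm]
    simp only [hfun]
    simp only [show ∀ i : Int, (PySem.Set.empty : PySem.Set Int).contains i = false from fun _ => rfl,
      Bool.false_or, show ((0:Int)+1) = 1 from rfl, show ((1:Int)+1) = 2 from rfl,
      show ((2:Int)+1) = 3 from rfl]
    simp only [show ((0:Int) = 0) = True from by simp, show ((0:Int) = 1) = False from by simp,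
      show ((0:Int) = 2) = False from by simp, show ((0:Int) = 3) = False from by simp,
      show ((1:Int) = 0) = False from by simp, show ((1:Int) = 1) = True from by simp,
      show ((1:Int) = 2) = False from by simp, show ((1:Int) = 3) = False from by simp,
      show ((2:Int) = 0) = False from by simp, show ((2:Int) = 1) = False from by simp,
      show ((2:Int) = 2) = True from by simp, show ((2:Int) = 3) = False from by simp,
      show ((3:Int) = 0) = False from by simp, show ((3:Int) = 1) = False from by simp,
      show ((3:Int) = 2) = False from by simp, show ((3:Int) = 3) = True from by simp,
      decide_true, decide_false, Bool.true_and, Bool.false_and, Bool.or_false, Bool.false_or]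
    simp only [pv_any_one, pv_any_tri]
    generalize missing_params.contains "max_thickness" = b0
    generalize missing_params.contains "v1" = b1
    generalize missing_params.contains "v2" = b2
    generalize missing_params.contains "v3" = b3
    generalize missing_params.contains "rho1" = b4
    generalize missing_params.contains "rho2" = b5
    generalize missing_params.contains "rho3" = b6
    generalize missing_params.contains "wavelet_freq" = b7
    cases b0 <;> cases b1 <;> cases b2 <;> cases b3 <;>
    cases b4 <;> cases b5 <;> cases b6 <;> cases b7 <;> decide
  · by_cases h2 : tool_name = "make_ricker"
    · subst h2
      rw [show pvParamHint.get? "make_ricker" = some pvRIdx from by decide]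
      simp only [show (("make_ricker" : String) == "wedge_model") = false from rfl,
        show (("make_ricker" : String) == "make_ricker") = true from rfl,
        Bool.false_eq_true, if_true, if_false]
      simp only [show pvHints.get? "make_ricker" = some
          ["- \"30 Hz Ricker wavelet\"", "- \"with 0.001s sampling\""] from by decide,
        Option.getD_some, PySem.List.enumerate, List.filter, pv_contains_fold]
      have hfun : ∀ (k : Int), (fun p => pvRIdx.get? p == some k) =
          (fun p => decide (k = 0) && (p == "frequency")
            || decide (k = 1) && (p == "dt")) := by
        intro k
        funext p
        rw [pvRIdx_get]
        split_ifs with a b <;> subst_eqs <;>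
          by_cases hk0 : k = 0 <;> by_cases hk1 : k = 1 <;>
          simp_all [beq_eq_decide, eq_comm]
      simp only [hfun]
      simp only [show ∀ i : Int, (PySem.Set.empty : PySem.Set Int).contains i = false from fun _ => rfl,
        Bool.false_or, show ((0:Int)+1) = 1 from rfl]
      simp only [show ((0:Int) = 0) = True from by simp, show ((0:Int) = 1) = False from by simp,
        show ((1:Int) = 0) = False from by simp, show ((1:Int) = 1) = True from by simp,
        decide_true, decide_false, Bool.true_and, Bool.false_and, Bool.or_false, Bool.false_or]
      simp only [pv_any_one]
      generalize missing_params.contains "frequency" = b0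
      generalize missing_params.contains "dt" = b1
      cases b0 <;> cases b1 <;> decide
    · have hp : pvParamHint.get? tool_name = none := by
        have hit : pvParamHint.items =
            [("wedge_model", pvWIdx), ("make_ricker", pvRIdx)] := by decide
        simp [PySem.Dict.get?, hit, List.find?,
          show ("wedge_model" == tool_name) = false from by simp [Ne.symm h1],
          show ("make_ricker" == tool_name) = false from by simp [Ne.symm h2]]
      rw [show (tool_name == "wedge_model") = false from by simp [h1],
        show (tool_name == "make_ricker") = false from by simp [h2], hp]
      simp
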